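-- pv_equiv track=rewrite | github.com/gongzhaopeng/solutions.questions.algoexpert.io | Easy/OptimalFreelancing_Easy/SolutionI_OptimalFreelancing_Easy.py | optimalFreelancing
-- ===== SOURCE A (Python) =====
-- import operator
--
-- def optimalFreelancing(jobs):
--     jobs.sort(key=operator.itemgetter('payment'), reverse=True)
--     duration, count, profit = 7, 0, 0
--     schedule = [False] * duration
--     for job in jobs:
--         for d in reversed(range(min(job['deadline'], duration))):
--             if not schedule[d]:
--                 schedule[d], count, profit = True, count + 1, profit + job['payment']
--                 if count == duration:
--                     return profit
--                 break
--     return profit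
-- ===== SOURCE B (Python) =====
-- import operator
--
-- def optimalFreelancing(jobs):
--     jobs.sort(key=operator.itemgetter('payment'), reverse=True)
--     remaining = list(jobs)
--     profit = 0
--     for d in range(6, -1, -1):
--         for i in range(len(remaining)):
--             if remaining[i]['deadline'] > d:
--                 profit += remaining[i]['payment']
--                 del remaining[i]
--                 break
--     return profit
-- ===== Notes on version B (the rewrite author's own statement) =====
-- stated objective: alternative
-- what changed: A loops over jobs and assigns each to the latest free day of a boolean 7-slot schedule with a count and early return; B inverts the nesting: it loops over the 7 day-slots from 6 down to 0 and, for each slot, scans the payment-sorted remaining jobs for the first one whose deadline exceeds the slot, deletes it and adds its payment - no schedule array, no count, no early return.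
-- outside the precondition, e.g. on optimalFreelancing([{'payment': 3}]): A raises KeyError, B raises KeyError
import Mathlib
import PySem

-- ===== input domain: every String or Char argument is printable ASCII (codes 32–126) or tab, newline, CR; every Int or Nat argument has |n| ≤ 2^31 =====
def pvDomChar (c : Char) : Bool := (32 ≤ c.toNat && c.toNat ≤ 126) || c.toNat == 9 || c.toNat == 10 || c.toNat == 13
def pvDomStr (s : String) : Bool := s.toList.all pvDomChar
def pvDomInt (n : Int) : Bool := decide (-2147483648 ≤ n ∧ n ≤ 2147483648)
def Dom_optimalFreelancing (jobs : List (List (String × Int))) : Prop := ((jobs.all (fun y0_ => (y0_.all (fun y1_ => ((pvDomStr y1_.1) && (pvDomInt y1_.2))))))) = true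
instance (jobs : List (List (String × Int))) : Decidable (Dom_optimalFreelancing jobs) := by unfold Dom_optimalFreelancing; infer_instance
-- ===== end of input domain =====

-- B inverts A's nesting: instead of A's loop over jobs assigning each to the latest free day
-- of a boolean 7-slot schedule (with count and early return), B loops over the 7 day-slots
-- from 6 down to 0 and lets each slot take the first remaining payment-sorted job whose
-- deadline exceeds it (objective: alternative, not faster). Both A and B sort `jobs` in place
-- (descending by payment); the equivalence proved here is about the return value.

-- job[k] for k ∈ {"deadline","payment"}; Pre_ guarantees the key is present
-- (Python raises KeyError otherwise), so the getD default is never seen under Pre_.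
def pvJobGet (job : List (String × Int)) (k : String) : Int :=
  ((PySem.Dict.mk job).get? k).getD 0

-- ===== PORT A =====
-- inner loop: for d in reversed(range(min(job['deadline'], duration))): first free d (break)
def pvFindSlotA (sched : List Bool) (dl : Int) : Option Int :=
  ((PySem.List.pyRange 0 (min dl 7) 1).reverse).find? (fun d => !(PySem.List.pyGetD sched d true))

def pvLoopA : List (List (String × Int)) → List Bool → Int → Int → Int
  | [], _, _, profit => profit
  | job :: rest, sched, count, profit =>
    match pvFindSlotA sched (pvJobGet job "deadline") with
    | none => pvLoopA rest sched count profit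
    | some d =>
      if count + 1 == 7 then profit + pvJobGet job "payment"   -- early `return profit`
      else pvLoopA rest (PySem.List.pySetD sched d true) (count + 1)
             (profit + pvJobGet job "payment")

def optimalFreelancing (jobs : List (List (String × Int))) : Int :=
  pvLoopA (PySem.List.sorted jobs (fun j => pvJobGet j "payment") true)
    (PySem.List.pyRepeat [false] 7) 0 0

-- ===== PORT B =====
-- B's inner loop: scan `remaining` for the first job with deadline > d; on a hit return its
-- payment and the list with that job deleted (`del remaining[i]; break`).
def pvScanB (d : Int) : List (List (String × Int)) → Option (Int × List (List (String × Int)))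
  | [] => none
  | job :: rest =>
    if pvJobGet job "deadline" > d then some (pvJobGet job "payment", rest)
    else match pvScanB d rest with
      | none => none
      | some (pay, rem) => some (pay, job :: rem)

-- B's outer loop: for d in range(6, -1, -1)
def pvLoopB : List Int → List (List (String × Int)) → Int → Int
  | [], _, profit => profit
  | d :: ds, remaining, profit =>
    match pvScanB d remaining with
    | none => pvLoopB ds remaining profit
    | some (pay, rem) => pvLoopB ds rem (profit + pay)

def optimalFreelancing_alt (jobs : List (List (String × Int))) : Int :=
  pvLoopB (PySem.List.pyRange 6 (-1) (-1))
    (PySem.List.sorted jobs (fun j => pvJobGet j "payment") true) 0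

-- ===== PRECONDITION & SPEC =====
-- Pre_ excludes jobs lists in which some dict lacks the key "deadline" or "payment": there the
-- Python A raises KeyError — except when a deadline-less job comes after the schedule is already
-- full, where A returns early and B returns the same value (that corner is excluded too).
def Pre_optimalFreelancing (jobs : List (List (String × Int))) : Prop :=
  ∀ job ∈ jobs, "deadline" ∈ job.map Prod.fst ∧ "payment" ∈ job.map Prod.fst
instance (jobs : List (List (String × Int))) : Decidable (Pre_optimalFreelancing jobs) := by
  unfold Pre_optimalFreelancing; infer_instance

def pvWitness_optimalFreelancing : (List (List (String × Int))) :=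
  [[("deadline", 3), ("payment", 10)], [("deadline", 1), ("payment", 7)]]

def Spec_optimalFreelancing (jobs : List (List (String × Int))) (out : Int) : Prop := out = optimalFreelancing_alt jobs
instance (jobs : List (List (String × Int))) (out : Int) : Decidable (Spec_optimalFreelancing jobs out) := by unfold Spec_optimalFreelancing; infer_instance

-- ===== CLAIM (what is proved, stated in full; the proofs are below) =====
def Claim_equal_optimalFreelancing : Prop := ∀ (jobs : List (List (String × Int))), Dom_optimalFreelancing jobs → Pre_optimalFreelancing jobs → Spec_optimalFreelancing jobs (optimalFreelancing jobs)

-- ===== LEMMAS AND PROOFS =====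

-- Proof bridge: A's loop equals a job-major loop `pvJM` over the descending list of still-free
-- slots; then slot-major B equals `pvJM` because each slot s (larger than all later free slots)
-- is taken by exactly the first job with deadline > s on either side.
def pvJM : List (List (String × Int)) → List Int → Int → Int
  | [], _, profit => profit
  | job :: rest, free, profit =>
    match free.find? (fun s => decide (s < pvJobGet job "deadline")) with
    | none => pvJM rest free profit
    | some slot => pvJM rest (free.filter (fun s => s != slot))
                     (profit + pvJobGet job "payment")

-- the free slots encoded by A's schedule array, in descending order
def pvFreeOf (sched : List Bool) : List Int :=
  ([6, 5, 4, 3, 2, 1, 0] : List Int).filter (fun d => !(PySem.List.pyGetD sched d true))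

lemma pvRange_filter (dl : Int) :
    (PySem.List.pyRange 0 (min dl 7) 1).reverse
      = ([6, 5, 4, 3, 2, 1, 0] : List Int).filter (fun d => decide (d < dl)) := by
  rcases lt_trichotomy dl 0 with h | h | h
  · rw [min_eq_left (by omega), PySem.List.pyRange_one_eq_nil (by omega), List.reverse_nil,
      Eq.comm, List.filter_eq_nil_iff]
    intro a ha
    fin_cases ha <;> simp <;> omega
  · subst h; decide
  · rcases Int.lt_or_le dl 7 with h7 | h7
    · interval_cases dl <;> decide
    · rw [min_eq_right h7,
        show (PySem.List.pyRange 0 7 1).reverse = ([6, 5, 4, 3, 2, 1, 0] : List Int) from by decide,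
        Eq.comm, List.filter_eq_self]
      intro a ha
      fin_cases ha <;> simp <;> omega

lemma pvFindA_eq (sched : List Bool) (dl : Int) :
    pvFindSlotA sched dl = (pvFreeOf sched).find? (fun s => decide (s < dl)) := by
  unfold pvFindSlotA pvFreeOf
  rw [pvRange_filter, List.find?_filter, List.find?_filter]
  congr 1
  funext a
  by_cases h : a < dl <;> by_cases h2 : (!(PySem.List.pyGetD sched a true)) = true <;>
    simp [h, h2]

lemma pvFreeOf_mem_bounds (sched : List Bool) {d : Int} (hd : d ∈ pvFreeOf sched) :
    0 ≤ d ∧ d < 7 := by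
  have h := List.mem_filter.1 hd |>.1
  fin_cases h <;> omega

lemma pvFreeOf_set (sched : List Bool) (h7 : sched.length = 7) {d : Int}
    (hd : d ∈ pvFreeOf sched) :
    pvFreeOf (PySem.List.pySetD sched d true) = (pvFreeOf sched).filter (fun s => s != d) := by
  obtain ⟨hd0, hd7⟩ := pvFreeOf_mem_bounds sched hd
  unfold pvFreeOf
  rw [List.filter_filter]
  apply List.filter_congr
  intro e he
  have he' : (0:Int) ≤ e ∧ e < 7 := by fin_cases he <;> omega
  rw [PySem.List.pySetD_of_nonneg sched true hd0]
  rw [PySem.List.pyGetD_eq_getElem _ _ he'.1 (by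
    simp [List.length_set, h7]; omega)]
  rw [PySem.List.pyGetD_eq_getElem _ _ he'.1 (by rw [h7]; exact_mod_cast he'.2)]
  rw [List.getElem_set]
  by_cases hde : e = d
  · subst hde; simp
  · have : ¬ d.toNat = e.toNat := by omega
    simp [this, bne]
    exact fun _ => hde

lemma pvFreeOf_nodup (sched : List Bool) : (pvFreeOf sched).Nodup :=
  (by decide : ([6, 5, 4, 3, 2, 1, 0] : List Int).Nodup).filter _

lemma pvJM_empty (rest : List (List (String × Int))) (p : Int) : pvJM rest [] p = p := by
  induction rest with
  | nil => rfl
  | cons j t ih => simpa [pvJM] using ih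

lemma pvLoopA_eq_pvJM (jobs : List (List (String × Int))) :
    ∀ (sched : List Bool) (count profit : Int), sched.length = 7 →
      count = 7 - ((pvFreeOf sched).length : Int) →
      pvLoopA jobs sched count profit = pvJM jobs (pvFreeOf sched) profit := by
  induction jobs with
  | nil => intro sched count profit _ _; rfl
  | cons job rest ih =>
    intro sched count profit h7 hc
    simp only [pvLoopA, pvJM, pvFindA_eq]
    cases hfind : (pvFreeOf sched).find? (fun s => decide (s < pvJobGet job "deadline")) with
    | none => exact ih sched count profit h7 hc
    | some d =>
      have hdmem : d ∈ pvFreeOf sched := List.mem_of_find?_eq_some hfind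
      have hlenpos : 0 < (pvFreeOf sched).length := List.length_pos_of_mem hdmem
      have hfil : (pvFreeOf sched).filter (fun s => s != d) = (pvFreeOf sched).erase d :=
        ((pvFreeOf_nodup sched).erase_eq_filter d).symm
      by_cases h7c : count + 1 = 7
      · have hl1 : (pvFreeOf sched).length = 1 := by omega
        obtain ⟨a, ha⟩ := List.length_eq_one_iff.1 hl1
        have had : a = d := by rw [ha] at hdmem; exact (List.mem_singleton.1 hdmem).symm
        subst had
        rw [ha] at hfil ⊢
        simp only [h7c, beq_self_eq_true, if_true]
        rw [hfil, List.erase_cons_head, pvJM_empty]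
      · have hbe : (count + 1 == (7:Int)) = false := by simp [h7c]
        simp only [hbe, Bool.false_eq_true, if_false]
        rw [ih (PySem.List.pySetD sched d true) (count + 1) (profit + pvJobGet job "payment")
          (by rw [PySem.List.length_pySetD, h7])
          (by rw [pvFreeOf_set sched h7 hdmem, hfil, List.length_erase_of_mem hdmem]; omega)]
        rw [pvFreeOf_set sched h7 hdmem]

-- Crux, step form: with the largest free slot s at the head, the job-major loop gives slot s to
-- exactly the first job whose deadline exceeds s (the job pvScanB finds), then continues on F.
lemma pvJM_step (jobs : List (List (String × Int))) :
    ∀ (s : Int) (F : List Int) (p : Int), (∀ f ∈ F, f < s) →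
      pvJM jobs (s :: F) p =
        match pvScanB s jobs with
        | none => pvJM jobs F p
        | some (pay, rem) => pvJM rem F (p + pay) := by
  induction jobs with
  | nil => intro s F p _; rfl
  | cons job rest ih =>
    intro s F p hF
    by_cases hdl : s < pvJobGet job "deadline"
    · -- job takes slot s on both sides
      have h1 : pvScanB s (job :: rest) = some (pvJobGet job "payment", rest) := by
        simp only [pvScanB]; rw [if_pos (by omega)]
      have h2 : (s :: F).find? (fun f => decide (f < pvJobGet job "deadline")) = some s :=
        List.find?_cons_of_pos (by simpa using hdl)
      have h3 : (s :: F).filter (fun f => f != s) = F := by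
        simp only [List.filter_cons, bne_self_eq_false, Bool.false_eq_true, if_false]
        exact List.filter_eq_self.2 (fun f hf => by have := hF f hf; simp [bne]; omega)
      simp only [pvJM, h1, h2, h3]
    · -- job's deadline ≤ s: slot s is invisible to it
      have h1 : pvScanB s (job :: rest) =
          (match pvScanB s rest with
           | none => none
           | some (pay, rem) => some (pay, job :: rem)) := by
        simp only [pvScanB]; rw [if_neg (by omega)]
      have h2 : (s :: F).find? (fun f => decide (f < pvJobGet job "deadline"))
          = F.find? (fun f => decide (f < pvJobGet job "deadline")) :=
        List.find?_cons_of_neg (by simpa using hdl)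
      cases hfind : F.find? (fun f => decide (f < pvJobGet job "deadline")) with
      | none =>
        cases hscan : pvScanB s rest with
        | none =>
          simp only [pvJM, h1, h2, hfind, hscan]
          rw [ih s F p hF, hscan]
        | some pr =>
          obtain ⟨pay, rem⟩ := pr
          simp only [pvJM, h1, h2, hfind, hscan]
          rw [ih s F p hF, hscan]
      | some t =>
        have htmem : t ∈ F := List.mem_of_find?_eq_some hfind
        have hcons : (s :: F).filter (fun f => f != t) = s :: F.filter (fun f => f != t) := by
          have hts : (s != t) = true := by have := hF t htmem; simp [bne]; omega
          simp [hts]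
        have hF' : ∀ f ∈ F.filter (fun f => f != t), f < s :=
          fun f hf => hF f (List.mem_of_mem_filter hf)
        cases hscan : pvScanB s rest with
        | none =>
          simp only [pvJM, h1, h2, hfind, hscan, hcons]
          rw [ih s (F.filter (fun f => f != t)) (p + pvJobGet job "payment") hF', hscan]
        | some pr =>
          obtain ⟨pay, rem⟩ := pr
          simp only [pvJM, h1, h2, hfind, hscan, hcons]
          rw [ih s (F.filter (fun f => f != t)) (p + pvJobGet job "payment") hF', hscan]
          exact congrArg (pvJM rem (F.filter (fun f => f != t))) (by ring)

lemma pvJM_eq_pvLoopB (free : List Int) :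
    ∀ (jobs : List (List (String × Int))) (p : Int), free.Pairwise (· > ·) →
      pvJM jobs free p = pvLoopB free jobs p := by
  induction free with
  | nil => intro jobs p _; exact pvJM_empty jobs p
  | cons s F ih =>
    intro jobs p hpw
    have hF : ∀ f ∈ F, f < s := fun f hf => (List.pairwise_cons.1 hpw).1 f hf
    rw [pvJM_step jobs s F p hF]
    cases hscan : pvScanB s jobs with
    | none =>
      simp only [pvLoopB, hscan]
      exact ih jobs p (List.pairwise_cons.1 hpw).2
    | some pr =>
      obtain ⟨pay, rem⟩ := pr
      simp only [pvLoopB, hscan]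
      exact ih rem (p + pay) (List.pairwise_cons.1 hpw).2

-- ===== VERDICT (by name: the statement is the Claim_ definition above) =====
theorem optimalFreelancing_spec : Claim_equal_optimalFreelancing := by
  intro jobs _ _
  unfold Spec_optimalFreelancing optimalFreelancing optimalFreelancing_alt
  rw [pvLoopA_eq_pvJM (PySem.List.sorted jobs (fun j => pvJobGet j "payment") true)
    (PySem.List.pyRepeat [false] 7) 0 0 (by decide) (by decide)]
  rw [show pvFreeOf (PySem.List.pyRepeat [false] 7) = [6, 5, 4, 3, 2, 1, 0] from by decide]
  rw [show PySem.List.pyRange 6 (-1) (-1) = ([6, 5, 4, 3, 2, 1, 0] : List Int) from by decide]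
  exact pvJM_eq_pvLoopB [6, 5, 4, 3, 2, 1, 0] _ 0 (by decide)
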